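-- pv_equiv track=rewrite | github.com/dynamo-nath/filecountQt4 | filecountQUERY.py | count_doc_type
-- ===== SOURCE A (Python) =====
-- def count_doc_type(direc, mylist):
--     '''sorts the list, counts each type, provides totals'''
--
--     type_count=[]
--     mylist.sort()
--     myString=""
--     a=str('There are: '+ str(len(mylist))+ ' files in '+ direc + '\n')
--     for z in range(len(mylist)):
--         if z+1==len(mylist):
--             d=(mylist[z] + " " + str(mylist.count(mylist[z]))+ '\n')
--             type_count.append(str(d))
--         elif mylist[z]!=mylist[z+1]:
--             f=(mylist[z] +" "+str(mylist.count(mylist[z]))+ '\n')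
--             type_count.append(str(f))
--     myString += a
--     for z1 in range(len(type_count)):
--         myString+=str(type_count[z1])
--     return myString
-- ===== SOURCE B (Python) =====
-- def count_doc_type(direc, mylist):
--     '''sorts the list, counts each type, provides totals'''
--     mylist.sort()
--     out = 'There are: ' + str(len(mylist)) + ' files in ' + direc + '\n'
--     i = 0
--     n = len(mylist)
--     while i < n:
--         j = i + 1
--         while j < n and mylist[j] == mylist[i]:
--             j += 1
--         out += mylist[i] + ' ' + str(j - i) + '\n'
--         i = j
--     return out
-- ===== Notes on version B (the rewrite author's own statement) =====
-- stated objective: faster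
-- what changed: Replaces A's index loop with run-boundary tests and a full-list .count() scan per distinct type by a single run-length pass over the sorted list (two-pointer run scan), keeping the in-place sort and exact formatting.
import Mathlib
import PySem

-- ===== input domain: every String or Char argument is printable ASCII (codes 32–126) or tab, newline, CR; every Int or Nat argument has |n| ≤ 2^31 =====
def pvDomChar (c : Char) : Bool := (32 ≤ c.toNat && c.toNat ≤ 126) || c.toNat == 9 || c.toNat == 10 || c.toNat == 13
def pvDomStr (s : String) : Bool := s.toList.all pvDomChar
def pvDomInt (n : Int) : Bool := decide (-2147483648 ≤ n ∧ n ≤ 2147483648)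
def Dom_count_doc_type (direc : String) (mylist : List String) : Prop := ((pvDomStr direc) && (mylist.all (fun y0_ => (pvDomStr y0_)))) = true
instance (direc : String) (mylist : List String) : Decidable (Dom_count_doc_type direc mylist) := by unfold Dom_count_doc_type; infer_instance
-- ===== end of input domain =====

-- B replaces A's per-index boundary tests with repeated full-list .count() scans by a single
-- run-length pass over the sorted list (objective: faster). Both A and B sort `mylist` in
-- place (the same observable mutation); the equivalence proved here is about the return value.

-- ===== PORT A =====
def count_doc_type (direc : String) (mylist : List String) : String :=
  let s := PySem.List.sorted mylist (fun x => x) false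
  let a := "There are: " ++ PySem.Int.toStr (PySem.List.len s) ++ " files in " ++ direc ++ "\n"
  let type_count : List String :=
    (PySem.List.pyRange 0 (PySem.List.len s)).foldl
      (fun acc z =>
        if z + 1 = PySem.List.len s then
          acc ++ [PySem.List.pyGetD s z "" ++ " " ++
                  PySem.Int.toStr ((PySem.List.count s (PySem.List.pyGetD s z "") : Int)) ++ "\n"]
        else if PySem.List.pyGetD s z "" ≠ PySem.List.pyGetD s (z + 1) "" then
          acc ++ [PySem.List.pyGetD s z "" ++ " " ++
                  PySem.Int.toStr ((PySem.List.count s (PySem.List.pyGetD s z "") : Int)) ++ "\n"]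
        else acc) []
  let myString := "" ++ a
  (PySem.List.pyRange 0 (PySem.List.len type_count)).foldl
    (fun acc z1 => acc ++ PySem.List.pyGetD type_count z1 "") myString

-- ===== PORT B =====
-- the outer `while i < n` loop of Source B: each step scans the current run (the inner while;
-- `j - i` is the run length `1 + takeWhile`), appends one line, and jumps to the run's end
def pvBLoop (acc : String) : List String → String
  | [] => acc
  | x :: xs =>
      pvBLoop (acc ++ (x ++ " " ++ PySem.Int.toStr ((1 + (xs.takeWhile (· == x)).length : Nat) : Int) ++ "\n"))
        (xs.dropWhile (· == x))
termination_by l => l.length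
decreasing_by
  exact Nat.lt_succ_of_le (List.length_dropWhile_le _ _)

def count_doc_type_alt (direc : String) (mylist : List String) : String :=
  let s := PySem.List.sorted mylist (fun x => x) false
  pvBLoop ("There are: " ++ PySem.Int.toStr (PySem.List.len s) ++ " files in " ++ direc ++ "\n") s

-- ===== PRECONDITION & SPEC =====
def Spec_count_doc_type (direc : String) (mylist : List String) (out : String) : Prop := out = count_doc_type_alt direc mylist
instance (direc : String) (mylist : List String) (out : String) : Decidable (Spec_count_doc_type direc mylist out) := by unfold Spec_count_doc_type; infer_instance

-- ===== CLAIM (what is proved, stated in full; the proofs are below) =====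
def Claim_equal_count_doc_type : Prop := ∀ (direc : String) (mylist : List String), Dom_count_doc_type direc mylist → Spec_count_doc_type direc mylist (count_doc_type direc mylist)

-- ===== LEMMAS AND PROOFS =====

-- the line A appends for value x (count taken over the whole sorted list)
def pvLn (full : List String) (x : String) : String :=
  x ++ " " ++ PySem.Int.toStr ((PySem.List.count full x : Int)) ++ "\n"

-- A's loop, rephrased structurally: emit a line at the last index of each run
def pvEmits (full : List String) : List String → List String
  | [] => []
  | [x] => [pvLn full x]
  | x :: y :: t => (if x ≠ y then [pvLn full x] else []) ++ pvEmits full (y :: t)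

-- the list of lines B appends (run-length lines)
def pvBLines : List String → List String
  | [] => []
  | x :: xs =>
      (x ++ " " ++ PySem.Int.toStr ((1 + (xs.takeWhile (· == x)).length : Nat) : Int) ++ "\n")
        :: pvBLines (xs.dropWhile (· == x))
termination_by l => l.length
decreasing_by
  exact Nat.lt_succ_of_le (List.length_dropWhile_le _ _)

theorem pv_empty_append (a : String) : "" ++ a = a := by cases a; rfl

theorem pvBLoop_eq_foldl (s : List String) : ∀ (acc : String),
    pvBLoop acc s = (pvBLines s).foldl (· ++ ·) acc := by
  induction s using pvBLines.induct with
  | case1 => intro acc; simp [pvBLoop, pvBLines]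
  | case2 x xs ih =>
      intro acc
      rw [pvBLoop, pvBLines, List.foldl_cons, ih]

theorem pvEmits_collapse (full : List String) (x : String) :
    ∀ (t r : List String), (∀ y ∈ t, y = x) →
    pvEmits full (x :: (t ++ r)) = pvEmits full (x :: r) := by
  intro t
  induction t with
  | nil => intro r _; rfl
  | cons z t' ih =>
      intro r h
      have hz : z = x := h z (by simp)
      subst hz
      have h2 := ih r (fun y hy => h y (by simp [hy]))
      calc pvEmits full (z :: (z :: t' ++ r)) = pvEmits full (z :: (t' ++ r)) := by
            simp [pvEmits]
        _ = pvEmits full (z :: r) := h2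

theorem pvEmits_eq_A_fold (full : List String) : ∀ (n k : Nat) (acc0 : List String),
    full.length - k = n → k ≤ full.length →
    (PySem.List.pyRange (k : Int) (PySem.List.len full)).foldl
      (fun acc z =>
        if z + 1 = PySem.List.len full then
          acc ++ [PySem.List.pyGetD full z "" ++ " " ++
                  PySem.Int.toStr ((PySem.List.count full (PySem.List.pyGetD full z "") : Int)) ++ "\n"]
        else if PySem.List.pyGetD full z "" ≠ PySem.List.pyGetD full (z + 1) "" then
          acc ++ [PySem.List.pyGetD full z "" ++ " " ++
                  PySem.Int.toStr ((PySem.List.count full (PySem.List.pyGetD full z "") : Int)) ++ "\n"]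
        else acc) acc0
    = acc0 ++ pvEmits full (full.drop k) := by
  intro n
  induction n with
  | zero =>
      intro k acc0 hn hk
      have hk' : k = full.length := by omega
      subst hk'
      rw [PySem.List.pyRange_one_eq_nil (by simp [PySem.List.len])]
      simp [pvEmits]
  | succ n ih =>
      intro k acc0 hn hk
      have hklt : k < full.length := by omega
      have hlen : PySem.List.len full = (full.length : Int) := by simp [PySem.List.len]
      rw [PySem.List.pyRange_one_cons (by rw [hlen]; exact_mod_cast hklt)]
      rw [List.foldl_cons]
      have hget : PySem.List.pyGetD full (k : Int) "" = full[k] := by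
        rw [PySem.List.pyGetD_natCast]; exact List.getD_eq_getElem _ _ hklt
      have hdrop : full.drop k = full[k] :: full.drop (k+1) := List.drop_eq_getElem_cons hklt
      have hstep : (k : Int) + 1 = ((k + 1 : Nat) : Int) := by push_cast; ring
      by_cases hend : k + 1 = full.length
      · have hcond : (k : Int) + 1 = PySem.List.len full := by rw [hlen]; exact_mod_cast hend
        rw [if_pos hcond]
        have hdrop1 : full.drop (k+1) = [] := List.drop_eq_nil_of_le (by omega)
        rw [hstep, ih (k+1) _ (by omega) (by omega)]
        rw [hdrop, hdrop1, hget]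
        simp [pvEmits, pvLn]
      · have hcond : ¬ ((k : Int) + 1 = PySem.List.len full) := by
          rw [hlen]; exact_mod_cast hend
        rw [if_neg hcond]
        have hk1 : k + 1 < full.length := by omega
        have hdrop1 : full.drop (k+1) = full[k+1] :: full.drop (k+2) := List.drop_eq_getElem_cons hk1
        have hget1 : PySem.List.pyGetD full ((k : Int) + 1) "" = full[k+1] := by
          rw [hstep, PySem.List.pyGetD_natCast]; exact List.getD_eq_getElem _ _ hk1
        rw [hget, hget1]
        by_cases hne : full[k] ≠ full[k+1]
        · rw [if_pos hne]
          rw [hstep, ih (k+1) _ (by omega) (by omega)]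
          rw [hdrop, hdrop1]
          simp [pvEmits, pvLn, hne, List.append_assoc]
        · rw [if_neg hne]
          rw [hstep, ih (k+1) _ (by omega) (by omega)]
          rw [hdrop, hdrop1]
          rw [not_not] at hne
          simp [pvEmits, hne]

theorem pv_dropWhile_head_false {p : String → Bool} :
    ∀ (l : List String) (y : String) (t' : List String), l.dropWhile p = y :: t' → p y = false := by
  intro l
  induction l with
  | nil => intro y t' h; rw [List.dropWhile_nil] at h; exact absurd h (by simp)
  | cons a l ih =>
      intro y t' h
      by_cases hpa : p a = true
      · rw [List.dropWhile_cons_of_pos hpa] at h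
        exact ih y t' h
      · rw [List.dropWhile_cons_of_neg hpa] at h
        cases h
        simpa using hpa

theorem pvEmits_eq_pvBLines (full : List String) : ∀ (s : List String),
    s.Pairwise (· ≤ ·) → (∀ v ∈ s, PySem.List.count full v = s.count v) →
    pvEmits full s = pvBLines s := by
  intro s
  induction s using pvBLines.induct with
  | case1 => intro _ _; simp [pvEmits, pvBLines]
  | case2 x xs ih =>
      intro hp hc
      have hxs : xs.takeWhile (· == x) ++ xs.dropWhile (· == x) = xs :=
        List.takeWhile_append_dropWhile
      have htx : ∀ y ∈ xs.takeWhile (· == x), y = x := by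
        intro y hy
        exact eq_of_beq (List.mem_takeWhile_imp (p := fun z => z == x) (l := xs) hy)
      have hxle : ∀ b ∈ xs, x ≤ b := (List.pairwise_cons.mp hp).1
      have hpxs : xs.Pairwise (· ≤ ·) := (List.pairwise_cons.mp hp).2
      have hpr : (xs.dropWhile (· == x)).Pairwise (· ≤ ·) :=
        List.Pairwise.sublist (List.dropWhile_sublist _) hpxs
      have hxr : x ∉ xs.dropWhile (· == x) := by
        intro hmem
        cases hrc : xs.dropWhile (· == x) with
        | nil => rw [hrc] at hmem; exact absurd hmem (List.not_mem_nil)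
        | cons y t' =>
            have hyx : (y == x) = false := pv_dropWhile_head_false xs y t' hrc
            have hyne : y ≠ x := by
              intro h; rw [h] at hyx; simp at hyx
            rw [hrc] at hmem
            rcases List.mem_cons.mp hmem with h | h
            · exact hyne h.symm
            · have hylex : y ≤ x := by
                have := List.pairwise_cons.mp (hrc ▸ hpr)
                exact this.1 x h
              have hxley : x ≤ y := hxle y ((List.dropWhile_sublist _).mem (by rw [hrc]; simp))
              exact hyne (le_antisymm hylex hxley)
      have h2 : List.count x (xs.takeWhile (· == x)) = (xs.takeWhile (· == x)).length :=
        List.count_eq_length.mpr (fun b hb => (htx b hb).symm)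
      have h3 : List.count x (xs.dropWhile (· == x)) = 0 := List.count_eq_zero.mpr hxr
      have h4 : List.count x xs = (xs.takeWhile (· == x)).length := by
        conv_lhs => rw [← hxs]
        rw [List.count_append, h2, h3]
        omega
      have hcx : List.count x full = 1 + (xs.takeWhile (· == x)).length := by
        rw [← PySem.List.count_eq, hc x (by simp), List.count_cons_self, h4]
        omega
      have hcr : ∀ v ∈ xs.dropWhile (· == x), PySem.List.count full v = (xs.dropWhile (· == x)).count v := by
        intro v hv
        have hvx : v ≠ x := fun h => hxr (h ▸ hv)
        have h5 : List.count v (xs.takeWhile (· == x)) = 0 :=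
          List.count_eq_zero.mpr (fun hvt => hvx (htx v hvt))
        rw [hc v (List.mem_cons_of_mem x ((List.dropWhile_sublist _).mem hv))]
        rw [List.count_cons_of_ne (Ne.symm hvx)]
        conv_lhs => rw [← hxs]
        rw [List.count_append, h5]
        omega
      have hcxI : ((List.count x full : Nat) : Int) = 1 + ((xs.takeWhile (· == x)).length : Int) := by
        rw [hcx]; push_cast; ring
      have hcollapse : pvEmits full (x :: xs) = pvEmits full (x :: xs.dropWhile (· == x)) := by
        conv_lhs => rw [← hxs]
        exact pvEmits_collapse full x _ _ htx
      rw [hcollapse]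
      cases hrc : xs.dropWhile (· == x) with
      | nil =>
          rw [pvBLines]
          simp only [pvEmits, pvLn, hrc, pvBLines, PySem.List.count_eq]
          rw [hcxI]
          norm_cast
      | cons y t' =>
          have hyx : (y == x) = false := pv_dropWhile_head_false xs y t' hrc
          have hxy : x ≠ y := by
            intro h; rw [h] at hyx; simp at hyx
          have hrec : pvEmits full (xs.dropWhile (· == x)) = pvBLines (xs.dropWhile (· == x)) :=
            ih hpr hcr
          rw [pvBLines]
          have hunf : pvEmits full (x :: y :: t') = pvLn full x :: pvEmits full (y :: t') := by
            simp [pvEmits, hxy]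
          rw [hrc, hunf, ← hrc, hrec]
          simp only [pvLn, PySem.List.count_eq, List.cons.injEq]
          refine ⟨?_, trivial⟩
          rw [hcxI]
          norm_cast

-- ===== VERDICT (by name: the statement is the Claim_ definition above) =====
theorem count_doc_type_spec : Claim_equal_count_doc_type := by
  intro direc mylist _
  unfold Spec_count_doc_type
  simp only [count_doc_type, count_doc_type_alt]
  have hpa := pvEmits_eq_A_fold (PySem.List.sorted mylist (fun x => x) false)
      (PySem.List.sorted mylist (fun x => x) false).length 0 [] (by omega) (Nat.zero_le _)
  simp only [Nat.cast_zero, List.drop_zero, List.nil_append] at hpa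
  rw [hpa]
  rw [PySem.List.foldl_pyRange_zero_pyGetD]
  have hpair : (PySem.List.sorted mylist (fun x => x) false).Pairwise (· ≤ ·) := by
    simpa using PySem.List.sorted_pairwise mylist (fun x => x)
  have hinv : ∀ v ∈ PySem.List.sorted mylist (fun x => x) false,
      PySem.List.count (PySem.List.sorted mylist (fun x => x) false) v
        = (PySem.List.sorted mylist (fun x => x) false).count v :=
    fun v _ => PySem.List.count_eq _ v
  rw [pvEmits_eq_pvBLines _ _ hpair hinv]
  rw [← pvBLoop_eq_foldl]
  rw [pv_empty_append]
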